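-- pv_equiv track=rewrite | github.com/Runsicker11/ai-marketing | seo/wordpress/elementor_template.py | _build_metrics_html
-- ===== SOURCE A (Python) =====
-- _METRICS_CSS = """<style>
-- .pe-metrics,
-- .pe-metrics * {
--   color: #ffffff !important;
-- }
-- .pe-metrics .metric {
--   margin-bottom: 10px;
-- }
-- .pe-metrics .label {
--   font-weight: 700;
--   display: block;
--   margin-bottom: 2px;
-- }
-- .pe-metrics .selected {
--   font-weight: 700;
--   background: #d85e3c;
--   padding: 2px 8px;
--   border-radius: 12px;
-- }
-- </style>"""
--
-- def _build_metrics_html(metrics: dict) -> str: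
--     """Generate the .pe-metrics HTML block from a {label: Low/Medium/High} dict."""
--     options = ["Low", "Medium", "High"]
--     rows = []
--     for label, selected in metrics.items():
--         parts = []
--         found = False
--         for i, opt in enumerate(options):
--             if opt == selected:
--                 parts.append(f'<span class="selected">{opt}</span>')
--                 found = True
--             elif not found:
--                 parts.append(f"<span>{opt} • </span>")
--             else:
--                 parts.append(f"<span> • {opt}</span>")
--         row = (
--             f'<div class="metric">\n'
--             f'  <span class="label">{label}</span>\n'
--             f'  {"".join(parts)}\n'
--             f"</div>"
--         )
--         rows.append(row)
--
--     return (
--         f'<div class="pe-metrics">\n'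
--         f'{_METRICS_CSS}\n\n'
--         + "\n\n".join(rows)
--         + "\n\n</div>"
--     )
-- ===== SOURCE B (Python) =====
-- _METRICS_CSS = """<style>
-- .pe-metrics,
-- .pe-metrics * {
--   color: #ffffff !important;
-- }
-- .pe-metrics .metric {
--   margin-bottom: 10px;
-- }
-- .pe-metrics .label {
--   font-weight: 700;
--   display: block;
--   margin-bottom: 2px;
-- }
-- .pe-metrics .selected {
--   font-weight: 700;
--   background: #d85e3c;
--   padding: 2px 8px;
--   border-radius: 12px;
-- }
-- </style>"""
--
--
-- def _build_metrics_html(metrics: dict) -> str: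
--     """Generate the .pe-metrics HTML block from a {label: Low/Medium/High} dict."""
--     options = ["Low", "Medium", "High"]
--     rows = []
--     for label, selected in metrics.items():
--         if selected in options:
--             idx = options.index(selected)
--             parts = (
--                 [f"<span>{o} • </span>" for o in options[:idx]]
--                 + [f'<span class="selected">{selected}</span>']
--                 + [f"<span> • {o}</span>" for o in options[idx + 1:]]
--             )
--         else:
--             parts = [f"<span>{o} • </span>" for o in options]
--         rows.append(
--             f'<div class="metric">\n'
--             f'  <span class="label">{label}</span>\n'
--             f'  {"".join(parts)}\n'
--             f"</div>"
--         )
--     return (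
--         f'<div class="pe-metrics">\n'
--         f'{_METRICS_CSS}\n\n'
--         + "\n\n".join(rows)
--         + "\n\n</div>"
--     )
-- ===== Notes on version B (the rewrite author's own statement) =====
-- stated objective: simpler
-- what changed: The flag-threaded single pass over the options (accumulating parts and a 'found' boolean) is replaced by a position-based split: look up selected's index once and build the prefix spans, the selected span and the suffix spans by slicing; the no-match case is a plain comprehension.
import Mathlib
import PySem

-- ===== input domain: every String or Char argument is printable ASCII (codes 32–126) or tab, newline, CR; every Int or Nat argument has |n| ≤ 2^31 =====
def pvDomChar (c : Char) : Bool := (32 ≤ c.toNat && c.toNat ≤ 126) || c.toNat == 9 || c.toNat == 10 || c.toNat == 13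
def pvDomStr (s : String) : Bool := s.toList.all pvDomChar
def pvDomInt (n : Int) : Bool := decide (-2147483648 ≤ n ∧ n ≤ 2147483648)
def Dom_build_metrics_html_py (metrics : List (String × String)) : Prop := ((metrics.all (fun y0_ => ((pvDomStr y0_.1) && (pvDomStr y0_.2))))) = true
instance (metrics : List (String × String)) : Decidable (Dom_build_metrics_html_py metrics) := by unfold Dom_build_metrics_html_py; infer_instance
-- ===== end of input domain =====

-- B replaces A's flag-threaded single pass over the options with a position-based split
-- around options.index(selected); objective: simpler. Return-value equivalence only
-- (neither version mutates its argument).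

def pvMetricsCSS : String := "<style>\n.pe-metrics,\n.pe-metrics * {\n  color: #ffffff !important;\n}\n.pe-metrics .metric {\n  margin-bottom: 10px;\n}\n.pe-metrics .label {\n  font-weight: 700;\n  display: block;\n  margin-bottom: 2px;\n}\n.pe-metrics .selected {\n  font-weight: 700;\n  background: #d85e3c;\n  padding: 2px 8px;\n  border-radius: 12px;\n}\n</style>"

-- ===== PORT A =====
-- the assoc list stands for a Python dict: iteration = items of Dict.ofList
def build_metrics_html_py (metrics : List (String × String)) : String :=
  let options : List String := ["Low", "Medium", "High"]
  let rows : List String :=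
    (PySem.Dict.ofList metrics).items.foldl (fun rows lp =>
      let label := lp.1
      let selected := lp.2
      let st :=
        (PySem.List.enumerate options).foldl (fun (st : List String × Bool) io =>
          let opt := io.2
          if opt == selected then
            (st.1 ++ ["<span class=\"selected\">" ++ opt ++ "</span>"], true)
          else if !st.2 then
            (st.1 ++ ["<span>" ++ opt ++ " • </span>"], st.2)
          else
            (st.1 ++ ["<span> • " ++ opt ++ "</span>"], st.2)) ([], false)
      let row := "<div class=\"metric\">\n  <span class=\"label\">" ++ label ++
        "</span>\n  " ++ String.join st.1 ++ "\n</div>"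
      rows ++ [row]) []
  "<div class=\"pe-metrics\">\n" ++ pvMetricsCSS ++ "\n\n" ++
    String.intercalate "\n\n" rows ++ "\n\n</div>"

-- ===== PORT B =====
def build_metrics_html_py_alt (metrics : List (String × String)) : String :=
  let options : List String := ["Low", "Medium", "High"]
  let rows : List String :=
    (PySem.Dict.ofList metrics).items.map (fun lp =>
      let label := lp.1
      let selected := lp.2
      let parts : List String :=
        match PySem.List.index? options selected with
        | some idx =>
            ((options.take idx).map (fun o => "<span>" ++ o ++ " • </span>")) ++
            ["<span class=\"selected\">" ++ selected ++ "</span>"] ++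
            ((options.drop (idx + 1)).map (fun o => "<span> • " ++ o ++ "</span>"))
        | none => options.map (fun o => "<span>" ++ o ++ " • </span>")
      "<div class=\"metric\">\n  <span class=\"label\">" ++ label ++
        "</span>\n  " ++ String.join parts ++ "\n</div>")
  "<div class=\"pe-metrics\">\n" ++ pvMetricsCSS ++ "\n\n" ++
    String.intercalate "\n\n" rows ++ "\n\n</div>"

-- ===== PRECONDITION & SPEC =====
def Spec_build_metrics_html_py (metrics : List (String × String)) (out : String) : Prop := out = build_metrics_html_py_alt metrics
instance (metrics : List (String × String)) (out : String) : Decidable (Spec_build_metrics_html_py metrics out) := by unfold Spec_build_metrics_html_py; infer_instance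

-- ===== CLAIM (what is proved, stated in full; the proofs are below) =====
def Claim_equal_build_metrics_html_py : Prop := ∀ (metrics : List (String × String)), Dom_build_metrics_html_py metrics → Spec_build_metrics_html_py metrics (build_metrics_html_py metrics)

-- ===== LEMMAS AND PROOFS =====

-- A's inner pass and B's index-based split build the same parts list, for any selected.
theorem pv_parts_eq (selected : String) :
    ((PySem.List.enumerate (["Low", "Medium", "High"] : List String)).foldl
      (fun (st : List String × Bool) io =>
        let opt := io.2
        if opt == selected then
          (st.1 ++ ["<span class=\"selected\">" ++ opt ++ "</span>"], true)
        else if !st.2 then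
          (st.1 ++ ["<span>" ++ opt ++ " • </span>"], st.2)
        else
          (st.1 ++ ["<span> • " ++ opt ++ "</span>"], st.2)) ([], false)).1 =
    (match PySem.List.index? (["Low", "Medium", "High"] : List String) selected with
     | some idx =>
         (((["Low", "Medium", "High"] : List String).take idx).map
            (fun o => "<span>" ++ o ++ " • </span>")) ++
         ["<span class=\"selected\">" ++ selected ++ "</span>"] ++
         (((["Low", "Medium", "High"] : List String).drop (idx + 1)).map
            (fun o => "<span> • " ++ o ++ "</span>"))
     | none => (["Low", "Medium", "High"] : List String).map
         (fun o => "<span>" ++ o ++ " • </span>")) := by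
  by_cases h1 : ("Low" : String) = selected
  · subst h1; decide
  · by_cases h2 : ("Medium" : String) = selected
    · subst h2; decide
    · by_cases h3 : ("High" : String) = selected
      · subst h3; decide
      · have e1 : (("Low" : String) == selected) = false := by simp [h1]
        have e2 : (("Medium" : String) == selected) = false := by simp [h2]
        have e3 : (("High" : String) == selected) = false := by simp [h3]
        simp [PySem.List.enumerate, PySem.List.index?_eq_idxOf?, List.idxOf?, List.findIdx?,
          List.findIdx?.go, List.foldl, e1, e2, e3, h1, h2, h3]

-- A's row-building foldl equals acc ++ the map of B's row builder.
theorem pv_rows (l : List (String × String)) (acc : List String) :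
    l.foldl (fun rows lp =>
      let label := lp.1
      let selected := lp.2
      let st :=
        (PySem.List.enumerate (["Low", "Medium", "High"] : List String)).foldl
          (fun (st : List String × Bool) io =>
            let opt := io.2
            if opt == selected then
              (st.1 ++ ["<span class=\"selected\">" ++ opt ++ "</span>"], true)
            else if !st.2 then
              (st.1 ++ ["<span>" ++ opt ++ " • </span>"], st.2)
            else
              (st.1 ++ ["<span> • " ++ opt ++ "</span>"], st.2)) ([], false)
      let row := "<div class=\"metric\">\n  <span class=\"label\">" ++ label ++
        "</span>\n  " ++ String.join st.1 ++ "\n</div>"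
      rows ++ [row]) acc
    = acc ++ l.map (fun lp =>
      let label := lp.1
      let selected := lp.2
      let parts : List String :=
        match PySem.List.index? (["Low", "Medium", "High"] : List String) selected with
        | some idx =>
            (((["Low", "Medium", "High"] : List String).take idx).map
               (fun o => "<span>" ++ o ++ " • </span>")) ++
            ["<span class=\"selected\">" ++ selected ++ "</span>"] ++
            (((["Low", "Medium", "High"] : List String).drop (idx + 1)).map
               (fun o => "<span> • " ++ o ++ "</span>"))
        | none => (["Low", "Medium", "High"] : List String).map
            (fun o => "<span>" ++ o ++ " • </span>")
      "<div class=\"metric\">\n  <span class=\"label\">" ++ label ++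
        "</span>\n  " ++ String.join parts ++ "\n</div>") := by
  induction l generalizing acc with
  | nil => simp
  | cons x xs ih =>
    rw [List.foldl_cons, List.map_cons, ih]
    simp only [pv_parts_eq, List.append_assoc, List.singleton_append]

-- ===== VERDICT (by name: the statement is the Claim_ definition above) =====
theorem build_metrics_html_py_spec : Claim_equal_build_metrics_html_py := by
  intro metrics _
  unfold Spec_build_metrics_html_py build_metrics_html_py build_metrics_html_py_alt
  simp only [pv_rows, List.nil_append]
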